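-- pv_equiv track=rewrite | github.com/PlaviAjvar/PICLogicEmulator | xml_to_circuit.py | form_expression
-- ===== SOURCE A (Python) =====
-- def form_expression(parent_expressions, function_name):
--     # special case for single port operators
--     if function_name == "NOT" or function_name == "Buffer":
--         if len(parent_expressions) > 1:
--             raise Exception(function_name + " operator can only take single input")
--         return function_name + "(" + parent_expressions[0] + ")"
--
--     # for multiple port operators, generalize them recursively
--     # operators are assumed to be left associative, which is a typical assumption
--     expression = parent_expressions[0]
--     for parent_expression in parent_expressions[1:]:
--         expression = function_name + "(" + expression + "," + parent_expression + ")"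
--     return expression
-- ===== SOURCE B (Python) =====
-- def form_expression(parent_expressions, function_name):
--     # special case for single port operators (same guard and exception as the original)
--     if function_name == "NOT" or function_name == "Buffer":
--         if len(parent_expressions) > 1:
--             raise Exception(function_name + " operator can only take single input")
--         return function_name + "(" + parent_expressions[0] + ")"
--
--     # left-associative nesting via recursion over the reversed expression list:
--     # the last expression becomes the outermost right operand
--     def nest(rev):
--         if len(rev) <= 1:
--             return rev[0]
--         return function_name + "(" + nest(rev[1:]) + "," + rev[0] + ")"
--
--     return nest(parent_expressions[::-1])
-- ===== Notes on version B (the rewrite author's own statement) =====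
-- stated objective: alternative
-- what changed: The left-to-right accumulator loop is replaced by a recursive helper over the reversed expression list that mirrors the left-associative recurrence (outermost call pairs the nested prefix with the last operand).
import Mathlib
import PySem

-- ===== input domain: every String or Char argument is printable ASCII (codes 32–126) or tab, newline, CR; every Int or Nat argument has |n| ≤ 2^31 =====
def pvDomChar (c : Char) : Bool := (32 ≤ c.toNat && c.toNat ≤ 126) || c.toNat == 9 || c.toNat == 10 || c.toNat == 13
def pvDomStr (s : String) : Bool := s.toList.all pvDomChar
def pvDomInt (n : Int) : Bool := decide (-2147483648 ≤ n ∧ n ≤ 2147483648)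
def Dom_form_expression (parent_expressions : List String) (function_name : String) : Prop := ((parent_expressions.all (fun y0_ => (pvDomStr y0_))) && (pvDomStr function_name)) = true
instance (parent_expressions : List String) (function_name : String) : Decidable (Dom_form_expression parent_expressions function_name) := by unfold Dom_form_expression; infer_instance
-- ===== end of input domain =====

-- B replaces A's accumulator loop by a recursive helper over the reversed list mirroring the left-associative recurrence (objective: alternative, same cost).


-- ===== PORT A =====
def form_expression (parent_expressions : List String) (function_name : String) : String :=
  if function_name = "NOT" ∨ function_name = "Buffer" then
    -- len > 1 raises (excluded by Pre_); parent_expressions[0] raises on [] (excluded by Pre_)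
    function_name ++ "(" ++ (PySem.List.pyGet? parent_expressions 0).getD "" ++ ")"
  else
    match parent_expressions with
    | [] => ""   -- parent_expressions[0] raises IndexError here (excluded by Pre_)
    | e :: rest =>
        rest.foldl (fun expression p => function_name ++ "(" ++ expression ++ "," ++ p ++ ")") e

-- ===== PORT B =====
-- Source B's nest(rev): recursion over the reversed list; rev[0] on [] raises (excluded by Pre_)
def pvNest (function_name : String) : List String → String
  | [] => ""
  | [x] => x
  | x :: rest => function_name ++ "(" ++ pvNest function_name rest ++ "," ++ x ++ ")"

def form_expression_alt (parent_expressions : List String) (function_name : String) : String :=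
  if function_name = "NOT" ∨ function_name = "Buffer" then
    function_name ++ "(" ++ (PySem.List.pyGet? parent_expressions 0).getD "" ++ ")"
  else
    pvNest function_name parent_expressions.reverse

-- ===== PRECONDITION & SPEC =====
-- Pre_ excludes exactly the inputs where A raises: the empty list (IndexError) and
-- NOT/Buffer with more than one input (explicit Exception).
def Pre_form_expression (parent_expressions : List String) (function_name : String) : Prop :=
  parent_expressions ≠ [] ∧
  ((function_name = "NOT" ∨ function_name = "Buffer") → parent_expressions.length ≤ 1)
instance (parent_expressions : List String) (function_name : String) : Decidable (Pre_form_expression parent_expressions function_name) := by unfold Pre_form_expression; infer_instance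

def pvWitness_form_expression : List String × String := (["a", "b"], "AND")

def Spec_form_expression (parent_expressions : List String) (function_name : String) (out : String) : Prop := out = form_expression_alt parent_expressions function_name
instance (parent_expressions : List String) (function_name : String) (out : String) : Decidable (Spec_form_expression parent_expressions function_name out) := by unfold Spec_form_expression; infer_instance

-- ===== CLAIM (what is proved, stated in full; the proofs are below) =====
def Claim_equal_form_expression : Prop := ∀ (parent_expressions : List String) (function_name : String), Dom_form_expression parent_expressions function_name → Pre_form_expression parent_expressions function_name → Spec_form_expression parent_expressions function_name (form_expression parent_expressions function_name)

-- ===== LEMMAS AND PROOFS =====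

theorem pvNest_cons_ne_nil (f y : String) (l : List String) (h : l ≠ []) :
    pvNest f (y :: l) = f ++ "(" ++ pvNest f l ++ "," ++ y ++ ")" := by
  cases l with
  | nil => exact absurd rfl h
  | cons a t => rfl

theorem pvNest_append_pair (f a b : String) (ys : List String) :
    pvNest f (ys ++ [a, b]) = pvNest f (ys ++ [f ++ "(" ++ b ++ "," ++ a ++ ")"]) := by
  induction ys with
  | nil => rfl
  | cons y ys ih =>
      rw [List.cons_append, List.cons_append,
        pvNest_cons_ne_nil f y _ (by simp), pvNest_cons_ne_nil f y _ (by simp), ih]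

theorem foldl_eq_pvNest (f : String) (xs : List String) (acc : String) :
    xs.foldl (fun expression p => f ++ "(" ++ expression ++ "," ++ p ++ ")") acc
      = pvNest f (xs.reverse ++ [acc]) := by
  induction xs generalizing acc with
  | nil => rfl
  | cons x xs ih =>
      rw [List.foldl_cons, ih, List.reverse_cons, List.append_assoc]
      exact (pvNest_append_pair f x acc xs.reverse).symm

-- ===== VERDICT (by name: the statement is the Claim_ definition above) =====
theorem form_expression_spec : Claim_equal_form_expression := by
  intro pe fn _ hpre
  unfold Spec_form_expression form_expression form_expression_alt
  split
  · rfl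
  · cases pe with
    | nil => exact absurd rfl hpre.1
    | cons e rest =>
        simp only [foldl_eq_pvNest fn rest e, List.reverse_cons]
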